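-- pv_equiv track=rewrite | github.com/ayoubzulfiqar/Leetcode-Medium | SwapForLongestRepeatedCharacterSubstring/swap_for_longest_repeated_character_substring.py | maxRepOpt1
-- ===== SOURCE A (Python) =====
-- import collections
--
-- def maxRepOpt1(text: str) -> int:
--     n = len(text)
--     if n == 0:
--         return 0
--
--     counts = collections.Counter(text)
--
--     blocks = []
--     if n > 0:
--         current_char = text[0]
--         current_len = 0
--         for i in range(n):
--             if text[i] == current_char:
--                 current_len += 1
--             else:
--                 blocks.append((current_char, current_len))
--                 current_char = text[i]
--                 current_len = 1
--         blocks.append((current_char, current_len))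
--
--     max_len = 0
--     if n > 0:
--         max_len = 1
--
--     for char, length in blocks:
--         if counts[char] > length:
--             max_len = max(max_len, length + 1)
--         else:
--             max_len = max(max_len, length)
--
--     for i in range(len(blocks) - 2):
--         block1_char, block1_len = blocks[i]
--         block_middle_char, block_middle_len = blocks[i+1]
--         block2_char, block2_len = blocks[i+2]
--
--         if block1_char == block2_char and block_middle_len == 1:
--             char_to_merge = block1_char
--
--             if counts[char_to_merge] > (block1_len + block2_len):
--                 max_len = max(max_len, block1_len + block2_len + 1)
--             else:
--                 max_len = max(max_len, block1_len + block2_len)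
--
--     return max_len
-- ===== SOURCE B (Python) =====
-- import collections
--
-- def maxRepOpt1(text: str) -> int:
--     # One fused pass, O(1) extra state: no stored block list, no second indexed scan.
--     if not text:
--         return 0
--     counts = collections.Counter(text)
--
--     def cand(ch, length):
--         return length + 1 if counts[ch] > length else length
--
--     best = 1
--     run_char, run_len = text[0], 1      # current run
--     prev_char, prev_len = None, 0       # run just before the current one
--     before_char, before_len = None, 0   # run before that
--     for ch in text[1:]:
--         if ch == run_char:
--             run_len += 1
--             continue
--         # current run closes: record its candidates
--         best = max(best, cand(run_char, run_len))
--         if prev_len == 1 and before_char == run_char: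
--             best = max(best, cand(run_char, before_len + run_len))
--         before_char, before_len = prev_char, prev_len
--         prev_char, prev_len = run_char, run_len
--         run_char, run_len = ch, 1
--     best = max(best, cand(run_char, run_len))
--     if prev_len == 1 and before_char == run_char:
--         best = max(best, cand(run_char, before_len + run_len))
--     return best
-- ===== Notes on version B (the rewrite author's own statement) =====
-- stated objective: alternative
-- what changed: A materialises the run-length block list and then makes two more scans over it (a per-block scan plus an indexed scan over block triples); B computes the same maximum in one fused left-to-right pass over the string, keeping only O(1) state (best so far, the current run and the two preceding runs).
import Mathlib
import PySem

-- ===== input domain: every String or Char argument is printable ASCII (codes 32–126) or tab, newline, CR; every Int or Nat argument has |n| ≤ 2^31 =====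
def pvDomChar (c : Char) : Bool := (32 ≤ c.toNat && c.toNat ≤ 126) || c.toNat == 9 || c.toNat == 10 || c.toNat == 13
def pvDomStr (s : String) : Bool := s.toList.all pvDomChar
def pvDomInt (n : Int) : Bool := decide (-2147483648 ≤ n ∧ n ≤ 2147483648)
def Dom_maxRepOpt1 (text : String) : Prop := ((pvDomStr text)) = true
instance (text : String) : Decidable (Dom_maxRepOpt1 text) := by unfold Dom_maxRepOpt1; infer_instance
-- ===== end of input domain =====

-- B replaces A's stored block list and its two subsequent scans (per-block scan + indexed scan over
-- block triples) by a single fused pass over the string with O(1) extra state; objective: alternative.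

-- ===== PORT A =====
-- the body of A's block-building loop, verbatim (state = (blocks, current_char, current_len))
def aRunStep (st : List (Char × Int) × Char × Int) (c : Char) : List (Char × Int) × Char × Int :=
  if c == st.2.1 then (st.1, st.2.1, st.2.2 + 1)
  else (st.1 ++ [(st.2.1, st.2.2)], c, (1 : Int))

-- the body of A's first loop over blocks, verbatim
def aCandStep (counts : PySem.Dict Char Int) (m : Int) (p : Char × Int) : Int :=
  if counts.getD p.1 0 > p.2 then max m (p.2 + 1) else max m p.2

-- the body of A's loop over i in range(len(blocks) - 2), verbatim
def aTriStep (counts : PySem.Dict Char Int) (blocks : List (Char × Int)) (m i : Int) : Int :=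
  match PySem.List.pyGet? blocks i, PySem.List.pyGet? blocks (i + 1),
        PySem.List.pyGet? blocks (i + 2) with
  | some p1, some pm, some p2 =>
    if p1.1 == p2.1 && pm.2 == 1 then
      if counts.getD p1.1 0 > p1.2 + p2.2 then max m (p1.2 + p2.2 + 1)
      else max m (p1.2 + p2.2)
    else m
  | _, _, _ => m

-- literal transliteration of A: build the block list, then the per-block scan, then the triple scan
def maxRepOpt1 (text : String) : Int :=
  match text.toList with
  | [] => 0                                        -- n == 0
  | c0 :: _ =>
    let cs := text.toList
    let counts := PySem.Dict.counter cs            -- collections.Counter(text)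
    let st := cs.foldl aRunStep ([], c0, 0)        -- for i in range(n)
    let blocks := st.1 ++ [(st.2.1, st.2.2)]
    let m1 := blocks.foldl (aCandStep counts) 1    -- max_len = 1; for char, length in blocks
    (PySem.List.pyRange 0 ((blocks.length : Int) - 2) 1).foldl (aTriStep counts blocks) m1

-- ===== PORT B =====
-- the body of B's single loop, verbatim (state = (best, current run, previous run, run before that))
def bStep (counts : PySem.Dict Char Int)
    (st : Int × Char × Int × Option Char × Int × Option Char × Int) (ch : Char) :
    Int × Char × Int × Option Char × Int × Option Char × Int :=
  match st with
  | (best, rc, rl, pc, pl, bc, bl) =>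
    if ch == rc then (best, rc, rl + 1, pc, pl, bc, bl)
    else
      let best := max best (if counts.getD rc 0 > rl then rl + 1 else rl)
      let best := if pl == 1 && bc == some rc then
          max best (if counts.getD rc 0 > bl + rl then bl + rl + 1 else bl + rl) else best
      (best, ch, 1, some rc, rl, pc, pl)

-- B's post-loop flush, verbatim
def bFinish (counts : PySem.Dict Char Int)
    (st : Int × Char × Int × Option Char × Int × Option Char × Int) : Int :=
  match st with
  | (best, rc, rl, _pc, pl, bc, bl) =>
    let best := max best (if counts.getD rc 0 > rl then rl + 1 else rl)
    if pl == 1 && bc == some rc then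
      max best (if counts.getD rc 0 > bl + rl then bl + rl + 1 else bl + rl) else best

-- literal transliteration of B: one pass over text[1:], then the flush
def maxRepOpt1_alt (text : String) : Int :=
  match text.toList with
  | [] => 0
  | c0 :: rest =>
    let counts := PySem.Dict.counter text.toList
    bFinish counts (rest.foldl (bStep counts) (1, c0, 1, none, 0, none, 0))

-- ===== PRECONDITION & SPEC =====
def Spec_maxRepOpt1 (text : String) (out : Int) : Prop := out = maxRepOpt1_alt text
instance (text : String) (out : Int) : Decidable (Spec_maxRepOpt1 text out) := by unfold Spec_maxRepOpt1; infer_instance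

-- ===== CLAIM (what is proved, stated in full; the proofs are below) =====
def Claim_equal_maxRepOpt1 : Prop := ∀ (text : String), Dom_maxRepOpt1 text → Spec_maxRepOpt1 text (maxRepOpt1 text)

-- ===== LEMMAS AND PROOFS =====

-- candidate value of a stretch of `l` copies of `c`: one more if a spare `c` exists elsewhere
def candF (counts : PySem.Dict Char Int) (c : Char) (l : Int) : Int :=
  if counts.getD c 0 > l then l + 1 else l

-- run-length decomposition, cons style, starting from a current run (cur, len)
def mkRuns : List Char → Char → Int → List (Char × Int)
  | [], cur, len => [(cur, len)]
  | c :: t, cur, len =>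
    if c == cur then mkRuns t cur (len + 1) else (cur, len) :: mkRuns t c 1

-- running max of per-run candidates (A's first loop, normalised)
def candMaxFold (counts : PySem.Dict Char Int) (rs : List (Char × Int)) (m : Int) : Int :=
  rs.foldl (fun m p => max m (candF counts p.1 p.2)) m

-- A's triple loop as a recursion over a 3-window of the run list
def winFold (counts : PySem.Dict Char Int) : List (Char × Int) → Int → Int
  | r1 :: r2 :: r3 :: t, m =>
    winFold counts (r2 :: r3 :: t)
      (if r1.1 == r3.1 && r2.2 == 1 then max m (candF counts r1.1 (r1.2 + r3.2)) else m)
  | _, m => m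

-- B's pass lifted to the run level
def grun (counts : PySem.Dict Char Int) :
    List (Char × Int) → Option Char → Int → Option Char → Int → Int → Int
  | [], _, _, _, _, best => best
  | (c, l) :: rest, pc, pl, bc, bl, best =>
    let best := max best (candF counts c l)
    let best := if pl == 1 && bc == some c then max best (candF counts c (bl + l)) else best
    grun counts rest (some c) l pc pl best

-- A's first loop is candMaxFold
theorem loop1_eq (counts : PySem.Dict Char Int) (rs : List (Char × Int)) (m : Int) :
    rs.foldl (aCandStep counts) m = candMaxFold counts rs m := by
  unfold candMaxFold
  congr 1
  funext m p
  simp only [aCandStep, candF]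
  split_ifs <;> rfl

-- a max pulled inside the accumulator commutes out of candMaxFold
theorem candMaxFold_pull (counts : PySem.Dict Char Int) (rs : List (Char × Int)) (m x : Int) :
    candMaxFold counts rs (max m x) = max (candMaxFold counts rs m) x := by
  induction rs generalizing m with
  | nil => rfl
  | cons r t ih =>
    simp only [candMaxFold, List.foldl_cons] at *
    rw [max_right_comm, ih]

-- A's block-building loop produces mkRuns
theorem blocks_eq : ∀ (cs : List Char) (acc : List (Char × Int)) (cur : Char) (len : Int),
    (cs.foldl aRunStep (acc, cur, len)).1 ++
      [((cs.foldl aRunStep (acc, cur, len)).2.1, (cs.foldl aRunStep (acc, cur, len)).2.2)]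
    = acc ++ mkRuns cs cur len := by
  intro cs
  induction cs with
  | nil => intro acc cur len; simp [mkRuns]
  | cons c t ih =>
    intro acc cur len
    by_cases h : (c == cur) = true
    · simp only [List.foldl_cons, aRunStep, h, if_true, mkRuns]
      exact ih acc cur (len + 1)
    · simp only [List.foldl_cons, aRunStep, h, if_false, mkRuns, Bool.false_eq_true]
      rw [ih (acc ++ [(cur, len)]) c 1, List.append_assoc]
      rfl

-- A's indexed triple loop is winFold
theorem idx_gen (counts : PySem.Dict Char Int) (full : List (Char × Int)) :
    ∀ (bs pre : List (Char × Int)), full = pre ++ bs → ∀ m : Int,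
    (PySem.List.pyRange (pre.length) ((full.length : Int) - 2) 1).foldl
      (aTriStep counts full) m = winFold counts bs m := by
  intro bs
  induction bs with
  | nil =>
    intro pre hfull m
    rw [PySem.List.pyRange_one_eq_nil
      (by subst hfull; simp only [List.length_append, List.length_nil]; push_cast; omega)]
    rfl
  | cons r1 t ih =>
    match t with
    | [] =>
      intro pre hfull m
      rw [PySem.List.pyRange_one_eq_nil
        (by subst hfull; simp only [List.length_append, List.length_cons, List.length_nil];
            push_cast; omega)]
      rfl
    | [r2] =>
      intro pre hfull m
      rw [PySem.List.pyRange_one_eq_nil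
        (by subst hfull; simp only [List.length_append, List.length_cons, List.length_nil];
            push_cast; omega)]
      rfl
    | r2 :: r3 :: tt =>
      intro pre hfull m
      have hlt : (pre.length : Int) < (full.length : Int) - 2 := by
        subst hfull
        simp only [List.length_append, List.length_cons]
        push_cast; omega
      rw [PySem.List.pyRange_one_cons hlt, List.foldl_cons]
      have h0 : PySem.List.pyGet? full (pre.length) = some r1 := by
        subst hfull; exact PySem.List.pyGet?_append_length pre (r2 :: r3 :: tt) r1
      have h1 : PySem.List.pyGet? full ((pre.length : Int) + 1) = some r2 := by
        subst hfull
        have := PySem.List.pyGet?_append_right pre (r1 :: r2 :: r3 :: tt) 1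
        simpa using this
      have h2 : PySem.List.pyGet? full ((pre.length : Int) + 2) = some r3 := by
        subst hfull
        have := PySem.List.pyGet?_append_right pre (r1 :: r2 :: r3 :: tt) 2
        simpa using this
      have hbody : aTriStep counts full m (pre.length) =
          (if r1.1 == r3.1 && r2.2 == 1 then max m (candF counts r1.1 (r1.2 + r3.2)) else m) := by
        simp only [aTriStep, h0, h1, h2, candF]
        split_ifs <;> rfl
      rw [hbody]
      have hstart : ((pre.length : Int) + 1) = (((pre ++ [r1]).length : Int)) := by simp
      rw [hstart, ih (pre ++ [r1]) (by simp [hfull])]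
      rfl

-- B's character-level pass computes grun over mkRuns
theorem b_eq (counts : PySem.Dict Char Int) :
    ∀ (cs : List Char) (best : Int) (rc : Char) (rl : Int)
      (pc : Option Char) (pl : Int) (bc : Option Char) (bl : Int),
    bFinish counts (cs.foldl (bStep counts) (best, rc, rl, pc, pl, bc, bl))
    = grun counts (mkRuns cs rc rl) pc pl bc bl best := by
  intro cs
  induction cs with
  | nil =>
    intro best rc rl pc pl bc bl
    simp only [List.foldl_nil, bFinish, mkRuns, grun, candF]
  | cons c t ih =>
    intro best rc rl pc pl bc bl
    rw [List.foldl_cons]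
    by_cases h : (c == rc) = true
    · rw [show bStep counts (best, rc, rl, pc, pl, bc, bl) c
          = (best, rc, rl + 1, pc, pl, bc, bl) by simp [bStep, h]]
      rw [ih, mkRuns]
      simp [h]
    · have hb : bStep counts (best, rc, rl, pc, pl, bc, bl) c
          = ((if pl == 1 && bc == some rc then
                max (max best (if counts.getD rc 0 > rl then rl + 1 else rl))
                  (if counts.getD rc 0 > bl + rl then bl + rl + 1 else bl + rl)
              else max best (if counts.getD rc 0 > rl then rl + 1 else rl)),
             c, 1, some rc, rl, pc, pl) := by
        simp only [bStep, h, Bool.false_eq_true, if_false]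
      rw [hb, ih]
      simp only [mkRuns, h, Bool.false_eq_true, if_false, grun, candF]

-- the core correspondence: B's run pass with two-run context = A's remaining loops
theorem core (counts : PySem.Dict Char Int) :
    ∀ (rest : List (Char × Int)) (c1 : Char) (l1 : Int) (c2 : Char) (l2 : Int) (m : Int),
    grun counts rest (some c2) l2 (some c1) l1 m
    = winFold counts ((c1, l1) :: (c2, l2) :: rest) (candMaxFold counts rest m) := by
  intro rest
  induction rest with
  | nil => intro c1 l1 c2 l2 m; rfl
  | cons r t ih =>
    intro c1 l1 c2 l2 m
    obtain ⟨c3, l3⟩ := r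
    simp only [grun]
    rw [ih c2 l2 c3 l3]
    simp only [winFold, candMaxFold, List.foldl_cons]
    congr 1
    by_cases hc : c1 = c3
    · subst hc
      by_cases hl : l2 = 1
      · subst hl
        simp only [beq_self_eq_true, Bool.and_self, if_true]
        rw [max_assoc]
        exact (by simpa [candMaxFold] using
          candMaxFold_pull counts t (max m (candF counts c1 l3)) (candF counts c1 (l1 + l3)))
      · simp [hl]
    · have h1 : (c1 == c3) = false := by simp [hc]
      have h2 : ((some c1 : Option Char) == some c3) = false := by simp [hc]
      simp [h1, h2]

theorem mkRuns_ne_nil (cs : List Char) (cur : Char) (len : Int) :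
    mkRuns cs cur len ≠ [] := by
  induction cs generalizing cur len with
  | nil => simp [mkRuns]
  | cons c t ih =>
    rw [mkRuns]
    split_ifs
    · exact ih _ _
    · simp

-- starting from the empty context, B's run pass = A's two loops
theorem start (counts : PySem.Dict Char Int) :
    ∀ (rs : List (Char × Int)) (m : Int), rs ≠ [] →
    grun counts rs none 0 none 0 m = winFold counts rs (candMaxFold counts rs m) := by
  intro rs m h
  match rs with
  | [(c, l)] => simp [grun, winFold, candMaxFold]
  | (c1, l1) :: (c2, l2) :: rest =>
    simp only [grun]
    rw [core]
    simp [candMaxFold]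

theorem idx0 (counts : PySem.Dict Char Int) (bs : List (Char × Int)) (m : Int) :
    (PySem.List.pyRange 0 ((bs.length : Int) - 2) 1).foldl (aTriStep counts bs) m
    = winFold counts bs m := by
  simpa using idx_gen counts bs bs [] rfl m

-- assembling both ports on a non-empty character list
theorem main_list (c0 : Char) (tl : List Char) :
    (let cs := c0 :: tl
     let counts := PySem.Dict.counter cs
     let st := cs.foldl aRunStep ([], c0, 0)
     let blocks := st.1 ++ [(st.2.1, st.2.2)]
     let m1 := blocks.foldl (aCandStep counts) 1
     (PySem.List.pyRange 0 ((blocks.length : Int) - 2) 1).foldl (aTriStep counts blocks) m1)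
    = (let counts := PySem.Dict.counter (c0 :: tl)
       bFinish counts (tl.foldl (bStep counts) (1, c0, 1, none, 0, none, 0))) := by
  simp only []
  have hblocks : ((c0 :: tl).foldl aRunStep ([], c0, 0)).1 ++
      [(((c0 :: tl).foldl aRunStep ([], c0, 0)).2.1, ((c0 :: tl).foldl aRunStep ([], c0, 0)).2.2)]
      = mkRuns tl c0 1 := by
    rw [blocks_eq (c0 :: tl) [] c0 0]
    simp [mkRuns]
  rw [hblocks, loop1_eq, idx0, b_eq,
    start (PySem.Dict.counter (c0 :: tl)) (mkRuns tl c0 1) 1 (mkRuns_ne_nil tl c0 1)]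

-- ===== VERDICT (by name: the statement is the Claim_ definition above) =====
theorem maxRepOpt1_spec : Claim_equal_maxRepOpt1 := by
  intro text _
  unfold Spec_maxRepOpt1 maxRepOpt1 maxRepOpt1_alt
  cases h : text.toList with
  | nil => rfl
  | cons c0 tl => exact main_list c0 tl
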